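-- pv_equiv track=rewrite | github.com/FahrenheitResearch/hermes-weather-agent | hermes_weather/tools/dataset.py | _cycles_for_model
-- ===== SOURCE A (Python) =====
-- def _cycles_for_model(model: str, requested: list[int] | None) -> list[int]:
--     if requested:
--         return sorted({int(c) % 24 for c in requested})
--     if model == "hrrr":
--         return list(range(24))
--     if model == "gfs":
--         return [0, 6, 12, 18]
--     return [0, 12]
-- ===== SOURCE B (Python) =====
-- def _insert_unique_sorted(out: list[int], h: int) -> list[int]:
--     # merge h into an ascending duplicate-free list, keeping it ascending and duplicate-free
--     if not out:
--         return [h]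
--     if out[0] < h:
--         return [out[0]] + _insert_unique_sorted(out[1:], h)
--     if out[0] == h:
--         return out
--     return [h] + out
--
--
-- def _cycles_for_model(model: str, requested: list[int] | None) -> list[int]:
--     if requested:
--         out: list[int] = []
--         for c in requested:
--             out = _insert_unique_sorted(out, int(c) % 24)
--         return out
--     if model == "hrrr":
--         return list(range(24))
--     if model == "gfs":
--         return [0, 6, 12, 18]
--     return [0, 12]
-- ===== Notes on version B (the rewrite author's own statement) =====
-- stated objective: alternative
-- what changed: Instead of collecting residues into a set and sorting it at the end, B builds the answer incrementally: each residue mod 24 is merged into an already-sorted duplicate-free list by a recursive ordered insertion, so no set and no final sort exist.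
import Mathlib
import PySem

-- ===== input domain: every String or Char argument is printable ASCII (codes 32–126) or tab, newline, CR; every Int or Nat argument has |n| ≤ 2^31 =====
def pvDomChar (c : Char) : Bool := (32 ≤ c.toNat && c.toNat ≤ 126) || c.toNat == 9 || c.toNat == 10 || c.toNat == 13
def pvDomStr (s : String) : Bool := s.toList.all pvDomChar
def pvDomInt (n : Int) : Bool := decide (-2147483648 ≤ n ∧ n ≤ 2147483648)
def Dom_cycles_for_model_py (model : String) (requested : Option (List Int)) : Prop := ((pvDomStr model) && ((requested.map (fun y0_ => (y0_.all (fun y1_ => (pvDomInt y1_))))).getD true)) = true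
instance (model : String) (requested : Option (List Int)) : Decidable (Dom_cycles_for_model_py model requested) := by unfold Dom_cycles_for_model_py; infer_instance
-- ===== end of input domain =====

-- B replaces "collect a set of residues, then sort it" by incremental ordered insertion:
-- each residue mod 24 is merged into an already-sorted duplicate-free list (alternative, not faster).

-- ===== PORT A =====
def cycles_for_model_py (model : String) (requested : Option (List Int)) : List Int :=
  if (requested.getD []) ≠ [] then
    -- sorted({int(c) % 24 for c in requested})
    PySem.List.sorted
      (PySem.Set.ofList ((requested.getD []).map (fun c => PySem.Int.mod c 24)))
      (fun x => x) false
  else if model == "hrrr" then PySem.List.pyRange 0 24 1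
  else if model == "gfs" then [0, 6, 12, 18]
  else [0, 12]

-- ===== PORT B =====
-- _insert_unique_sorted: merge h into an ascending duplicate-free list
def pvInsertUniqueSorted : List Int → Int → List Int
  | [], h => [h]
  | x :: t, h =>
    if x < h then x :: pvInsertUniqueSorted t h
    else if x == h then x :: t
    else h :: x :: t

def cycles_for_model_py_alt (model : String) (requested : Option (List Int)) : List Int :=
  if (requested.getD []) ≠ [] then
    -- out = []; for c in requested: out = _insert_unique_sorted(out, int(c) % 24)
    (requested.getD []).foldl (fun out c => pvInsertUniqueSorted out (PySem.Int.mod c 24)) []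
  else if model == "hrrr" then PySem.List.pyRange 0 24 1
  else if model == "gfs" then [0, 6, 12, 18]
  else [0, 12]

-- ===== PRECONDITION & SPEC =====
def Spec_cycles_for_model_py (model : String) (requested : Option (List Int)) (out : List Int) : Prop := out = cycles_for_model_py_alt model requested
instance (model : String) (requested : Option (List Int)) (out : List Int) : Decidable (Spec_cycles_for_model_py model requested out) := by unfold Spec_cycles_for_model_py; infer_instance

-- ===== CLAIM (what is proved, stated in full; the proofs are below) =====
def Claim_equal_cycles_for_model_py : Prop := ∀ (model : String) (requested : Option (List Int)), Dom_cycles_for_model_py model requested → Spec_cycles_for_model_py model requested (cycles_for_model_py model requested)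

-- ===== LEMMAS AND PROOFS =====

theorem pvMem_insertUniqueSorted (out : List Int) (h y : Int) :
    y ∈ pvInsertUniqueSorted out h ↔ y = h ∨ y ∈ out := by
  induction out with
  | nil => simp [pvInsertUniqueSorted]
  | cons x t ih =>
    unfold pvInsertUniqueSorted
    split_ifs with h1 h2
    · simp [ih]; tauto
    · have hxh : x = h := by simpa using h2
      subst hxh
      simp
    · simp

theorem pvPairwise_insertUniqueSorted (out : List Int) (h : Int)
    (hs : out.Pairwise (· < ·)) :
    (pvInsertUniqueSorted out h).Pairwise (· < ·) := by
  induction out with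
  | nil => simp [pvInsertUniqueSorted]
  | cons x t ih =>
    rw [List.pairwise_cons] at hs
    unfold pvInsertUniqueSorted
    split_ifs with h1 h2
    · rw [List.pairwise_cons]
      refine ⟨?_, ih hs.2⟩
      intro y hy
      rcases (pvMem_insertUniqueSorted t h y).mp hy with rfl | hy'
      · exact h1
      · exact hs.1 y hy'
    · exact List.pairwise_cons.mpr hs
    · have hxh : h < x := by
        have hne : ¬ x = h := by simpa using h2
        omega
      rw [List.pairwise_cons]
      refine ⟨?_, List.pairwise_cons.mpr hs⟩
      intro y hy
      rcases List.mem_cons.mp hy with rfl | hy'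
      · exact hxh
      · exact lt_trans hxh (hs.1 y hy')

theorem pvFold_invariant (l : List Int) (acc : List Int)
    (hs : acc.Pairwise (· < ·)) :
    (l.foldl (fun out c => pvInsertUniqueSorted out (PySem.Int.mod c 24)) acc).Pairwise (· < ·)
    ∧ ∀ y, y ∈ l.foldl (fun out c => pvInsertUniqueSorted out (PySem.Int.mod c 24)) acc
          ↔ y ∈ acc ∨ y ∈ l.map (fun c => PySem.Int.mod c 24) := by
  induction l generalizing acc with
  | nil => simp [hs]
  | cons c t ih =>
    simp only [List.foldl_cons, List.map_cons]
    obtain ⟨hp, hm⟩ := ih (pvInsertUniqueSorted acc (PySem.Int.mod c 24))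
      (pvPairwise_insertUniqueSorted acc _ hs)
    refine ⟨hp, fun y => ?_⟩
    rw [hm y, pvMem_insertUniqueSorted]
    simp; tauto

theorem pvBranch_eq (l : List Int) :
    PySem.List.sorted (PySem.Set.ofList (l.map (fun c => PySem.Int.mod c 24))) (fun x => x) false
      = l.foldl (fun out c => pvInsertUniqueSorted out (PySem.Int.mod c 24)) [] := by
  obtain ⟨hp, hm⟩ := pvFold_invariant l [] (by simp)
  apply PySem.List.sorted_eq_of_perm_of_pairwise_lt
  · rw [List.perm_ext_iff_of_nodup hp.nodup
      (PySem.Set.nodup_ofList (l.map (fun c => PySem.Int.mod c 24)))]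
    intro x
    rw [hm x, PySem.Set.mem_ofList]
    simp
  · exact hp

-- ===== VERDICT (by name: the statement is the Claim_ definition above) =====
theorem cycles_for_model_py_spec : Claim_equal_cycles_for_model_py := by
  intro model requested _
  unfold Spec_cycles_for_model_py cycles_for_model_py cycles_for_model_py_alt
  by_cases hne : (requested.getD []) ≠ []
  · simp only [if_pos hne]
    exact pvBranch_eq _
  · simp only [if_neg hne]
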